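-- pv_equiv track=rewrite | github.com/bearhockey/tyrra | src/castle/castle_roll.py | count_success
-- ===== SOURCE A (Python) =====
-- def count_success(dice, allow_crit=True):
--     success = 0
--     for d in dice:
--         if d > 6:
--             success += 1
--         elif d == 0:
--             if allow_crit:
--                 success += 2
--             else:
--                 success += 1
--     return success
-- ===== SOURCE B (Python) =====
-- def count_success(dice, allow_crit=True):
--     # Every scoring die (> 6 or a crit 0) is worth one success...
--     successes = len([d for d in dice if d > 6 or d == 0])
--     # ...and when crits are allowed, each 0 is worth one EXTRA success.
--     if allow_crit:
--         successes += dice.count(0)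
--     return successes
-- ===== Notes on version B (the rewrite author's own statement) =====
-- stated objective: simpler
-- what changed: Replaces A's per-die branch-weighted accumulation with a uniform count of all scoring dice (>6 or ==0) plus, only when crits are allowed, a separate zero-count bonus pass -- no per-element weighting or multiplier remains.
import Mathlib
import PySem

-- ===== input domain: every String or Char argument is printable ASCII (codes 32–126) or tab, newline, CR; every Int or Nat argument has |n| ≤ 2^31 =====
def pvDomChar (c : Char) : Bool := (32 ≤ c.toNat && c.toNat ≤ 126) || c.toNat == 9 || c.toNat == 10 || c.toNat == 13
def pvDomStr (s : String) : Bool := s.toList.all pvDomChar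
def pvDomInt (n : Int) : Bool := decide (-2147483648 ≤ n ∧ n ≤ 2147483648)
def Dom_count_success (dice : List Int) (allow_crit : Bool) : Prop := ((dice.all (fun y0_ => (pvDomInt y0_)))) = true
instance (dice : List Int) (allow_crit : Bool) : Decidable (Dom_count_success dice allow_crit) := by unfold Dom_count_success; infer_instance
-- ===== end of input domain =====

-- B counts all scoring dice (>6 or ==0) uniformly once, then adds a separate
-- zero-count bonus only when crits are allowed, instead of A's per-die
-- branch-weighted accumulating loop. Same O(n) cost, simpler decomposition.

-- ===== PORT A =====
-- literal transliteration: fold over dice carrying the running success count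
def count_success (dice : List Int) (allow_crit : Bool) : Int :=
  dice.foldl (fun success d =>
    if d > 6 then success + 1
    else if d = 0 then (if allow_crit then success + 2 else success + 1)
    else success) 0

-- ===== PORT B =====
-- successes = len([d for d in dice if d > 6 or d == 0]);
-- if allow_crit: successes += dice.count(0)
def count_success_alt (dice : List Int) (allow_crit : Bool) : Int :=
  let successes : Int := (dice.filter (fun d => d > 6 || d == 0)).length
  if allow_crit then successes + PySem.List.count dice 0 else successes

-- ===== PRECONDITION & SPEC =====
def Spec_count_success (dice : List Int) (allow_crit : Bool) (out : Int) : Prop := out = count_success_alt dice allow_crit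
instance (dice : List Int) (allow_crit : Bool) (out : Int) : Decidable (Spec_count_success dice allow_crit out) := by unfold Spec_count_success; infer_instance

-- ===== CLAIM =====
def Claim_equal_count_success : Prop := ∀ (dice : List Int) (allow_crit : Bool), Dom_count_success dice allow_crit → Spec_count_success dice allow_crit (count_success dice allow_crit)

-- ===== LEMMAS AND PROOFS =====

theorem count_success_shift (dice : List Int) (allow_crit : Bool) (s : Int) :
    dice.foldl (fun success d =>
      if d > 6 then success + 1
      else if d = 0 then (if allow_crit then success + 2 else success + 1)
      else success) s
    = s + dice.foldl (fun success d =>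
      if d > 6 then success + 1
      else if d = 0 then (if allow_crit then success + 2 else success + 1)
      else success) 0 := by
  induction dice generalizing s with
  | nil => simp
  | cons d ds ih =>
    simp only [List.foldl_cons]
    rw [ih, ih (if d > 6 then 0 + 1 else _)]
    split_ifs <;> ring

theorem count_success_eq (dice : List Int) (allow_crit : Bool) :
    count_success dice allow_crit = count_success_alt dice allow_crit := by
  induction dice with
  | nil => simp [count_success, count_success_alt, PySem.List.count]
  | cons d ds ih =>
    simp only [count_success, List.foldl_cons] at *
    rw [count_success_shift]
    simp only [count_success_alt, PySem.List.count, List.count_cons, List.filter_cons] at *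
    by_cases h6 : d > 6
    · have h0 : d ≠ 0 := by omega
      simp [h6, h0, ih]; split_ifs <;> push_cast <;> ring
    · by_cases h0 : d = 0
      · simp [h6, h0, ih]; split_ifs <;> push_cast <;> ring
      · simp [h6, h0, ih]

-- ===== VERDICT =====
theorem count_success_spec : Claim_equal_count_success := by
  intro dice allow_crit _
  unfold Spec_count_success
  exact count_success_eq dice allow_crit
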